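-- pv_equiv track=rewrite | github.com/sonambharti/Python | Hashmap/gridIllumination.py | gridIllumination
-- ===== SOURCE A (Python) =====
-- from collections import defaultdict
--
-- def gridIllumination(n, lamps, queries):
--     # Maps to store the number of lamps in each row, column, and diagonal
--     row_map = defaultdict(int)
--     col_map = defaultdict(int)
--     pos_diag_map = defaultdict(int)
--     neg_diag_map = defaultdict(int)
--
--     # Set to track the positions of the active lamps
--     lamp_set = set()
--
--     # Initialize the lamp maps and lamp set
--     for r, c in lamps:
--         if (r, c) in lamp_set:
--             continue
--         lamp_set.add((r, c))
--         row_map[r] += 1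
--         col_map[c] += 1
--         pos_diag_map[r + c] += 1
--         neg_diag_map[r - c] += 1
--
--     # Directions to turn off adjacent lamps (including the lamp itself)
--     directions = [(0, 0), (-1, 0), (1, 0), (0, -1), (0, 1), (-1, -1), (-1, 1), (1, -1), (1, 1)]
--
--     result = []
--
--     for r, c in queries:
--         # Check if the current cell is illuminated
--         if row_map[r] > 0 or col_map[c] > 0 or pos_diag_map[r + c] > 0 or neg_diag_map[r - c] > 0:
--             result.append(1)  # The cell is illuminated
--         else:
--             result.append(0)  # The cell is not illuminated
--
--         # Turn off the lamp at (r, c) and its adjacent cells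
--         for dr, dc in directions:
--             nr, nc = r + dr, c + dc
--             if (nr, nc) in lamp_set:
--                 lamp_set.remove((nr, nc))
--                 row_map[nr] -= 1
--                 col_map[nc] -= 1
--                 pos_diag_map[nr + nc] -= 1
--                 neg_diag_map[nr - nc] -= 1
--
--     return result
-- ===== SOURCE B (Python) =====
-- def gridIllumination(n, lamps, queries):
--     # One live list of lamp positions instead of four count maps + a set:
--     # a cell is lit iff some live lamp shares its row, column or a diagonal;
--     # after a query, every lamp within Chebyshev distance 1 is switched off.
--     live = list(lamps)
--     result = []
--     for r, c in queries:
--         lit = any(lr == r or lc == c or lr + lc == r + c or lr - lc == r - c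
--                   for lr, lc in live)
--         result.append(1 if lit else 0)
--         live = [(lr, lc) for lr, lc in live if abs(lr - r) > 1 or abs(lc - c) > 1]
--     return result
-- ===== Notes on version B (the rewrite author's own statement) =====
-- stated objective: simpler
-- what changed: Replaced A's four defaultdict counters plus a lamp set (built by dedup, updated per neighbor direction) with a single live lamp list: each query scans the list once for a shared row/column/diagonal and then filters out every lamp within Chebyshev distance 1, with no auxiliary index structures at all.
import Mathlib
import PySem

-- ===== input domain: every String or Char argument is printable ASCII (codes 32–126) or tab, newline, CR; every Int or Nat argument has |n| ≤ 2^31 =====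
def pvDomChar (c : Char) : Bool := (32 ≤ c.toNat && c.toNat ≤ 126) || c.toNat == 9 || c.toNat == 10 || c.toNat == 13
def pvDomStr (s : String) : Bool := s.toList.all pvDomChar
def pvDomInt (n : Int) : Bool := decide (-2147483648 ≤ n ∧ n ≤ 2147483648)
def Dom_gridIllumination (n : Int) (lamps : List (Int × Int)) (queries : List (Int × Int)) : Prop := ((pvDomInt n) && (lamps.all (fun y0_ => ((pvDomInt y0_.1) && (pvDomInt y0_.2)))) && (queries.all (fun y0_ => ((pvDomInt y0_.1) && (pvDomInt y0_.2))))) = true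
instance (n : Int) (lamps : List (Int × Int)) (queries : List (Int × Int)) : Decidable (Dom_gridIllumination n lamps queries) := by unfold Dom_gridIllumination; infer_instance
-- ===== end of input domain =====

-- B replaces A's four count maps + lamp set with one live lamp list scanned per query: simpler, same result.

-- ===== PORT A =====
-- state: (row_map, col_map, pos_diag_map, neg_diag_map, lamp_set)
def pvStA : Type := PySem.Dict Int Int × PySem.Dict Int Int × PySem.Dict Int Int × PySem.Dict Int Int × PySem.Set (Int × Int)

def pvStepLamp (st : pvStA) (p : Int × Int) : pvStA :=
  if PySem.Set.contains st.2.2.2.2 p then st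
  else (st.1.modify p.1 0 (· + 1), st.2.1.modify p.2 0 (· + 1),
        st.2.2.1.modify (p.1 + p.2) 0 (· + 1), st.2.2.2.1.modify (p.1 - p.2) 0 (· + 1),
        PySem.Set.add st.2.2.2.2 p)

def pvDirs : List (Int × Int) := [(0, 0), (-1, 0), (1, 0), (0, -1), (0, 1), (-1, -1), (-1, 1), (1, -1), (1, 1)]

-- 'lamp_set.remove' is reached only after the membership test, so it is Set.discard here
def pvStepDir (r c : Int) (st : pvStA) (d : Int × Int) : pvStA :=
  let q : Int × Int := (r + d.1, c + d.2)
  if PySem.Set.contains st.2.2.2.2 q then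
    (st.1.modify q.1 0 (· - 1), st.2.1.modify q.2 0 (· - 1),
     st.2.2.1.modify (q.1 + q.2) 0 (· - 1), st.2.2.2.1.modify (q.1 - q.2) 0 (· - 1),
     PySem.Set.discard st.2.2.2.2 q)
  else st

-- defaultdict reads 'row_map[r]' are getD _ 0 (the zero entries a read inserts are never observable)
def pvStepQuery (s : pvStA × List Int) (q : Int × Int) : pvStA × List Int :=
  let bit : Int := if 0 < s.1.1.getD q.1 0 ∨ 0 < s.1.2.1.getD q.2 0 ∨
      0 < s.1.2.2.1.getD (q.1 + q.2) 0 ∨ 0 < s.1.2.2.2.1.getD (q.1 - q.2) 0 then 1 else 0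
  (pvDirs.foldl (pvStepDir q.1 q.2) s.1, s.2 ++ [bit])

def gridIllumination (n : Int) (lamps : List (Int × Int)) (queries : List (Int × Int)) : List Int :=
  let st0 : pvStA := (PySem.Dict.empty, PySem.Dict.empty, PySem.Dict.empty, PySem.Dict.empty, PySem.Set.empty)
  let st1 := lamps.foldl pvStepLamp st0
  (queries.foldl pvStepQuery (st1, [])).2

-- ===== PORT B =====
def pvLit (q : Int × Int) (p : Int × Int) : Bool :=
  p.1 == q.1 || p.2 == q.2 || p.1 + p.2 == q.1 + q.2 || p.1 - p.2 == q.1 - q.2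

def pvFar (q : Int × Int) (p : Int × Int) : Bool :=
  decide (1 < |p.1 - q.1| ∨ 1 < |p.2 - q.2|)

def pvStepQueryB (s : List (Int × Int) × List Int) (q : Int × Int) : List (Int × Int) × List Int :=
  (s.1.filter (pvFar q), s.2 ++ [if s.1.any (pvLit q) then (1 : Int) else 0])

def gridIllumination_alt (n : Int) (lamps : List (Int × Int)) (queries : List (Int × Int)) : List Int :=
  (queries.foldl pvStepQueryB (lamps, [])).2

-- ===== PRECONDITION & SPEC =====
def Spec_gridIllumination (n : Int) (lamps : List (Int × Int)) (queries : List (Int × Int)) (out : List Int) : Prop := out = gridIllumination_alt n lamps queries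
instance (n : Int) (lamps : List (Int × Int)) (queries : List (Int × Int)) (out : List Int) : Decidable (Spec_gridIllumination n lamps queries out) := by unfold Spec_gridIllumination; infer_instance

-- ===== CLAIM (what is proved, stated in full; the proofs are below) =====
def Claim_equal_gridIllumination : Prop := ∀ (n : Int) (lamps : List (Int × Int)) (queries : List (Int × Int)), Dom_gridIllumination n lamps queries → Spec_gridIllumination n lamps queries (gridIllumination n lamps queries)

-- ===== LEMMAS AND PROOFS =====

-- invariant tying A's state to B's live list: set is duplicate-free, has the same members
-- as the live list, and each map holds the count of set lamps on that row/col/diagonal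
def pvRel (st : pvStA) (live : List (Int × Int)) : Prop :=
  st.2.2.2.2.Nodup ∧
  (∀ p : Int × Int, p ∈ st.2.2.2.2 ↔ p ∈ live) ∧
  (∀ k : Int, st.1.getD k 0 = (st.2.2.2.2.countP (fun p => p.1 == k) : Int)) ∧
  (∀ k : Int, st.2.1.getD k 0 = (st.2.2.2.2.countP (fun p => p.2 == k) : Int)) ∧
  (∀ k : Int, st.2.2.1.getD k 0 = (st.2.2.2.2.countP (fun p => p.1 + p.2 == k) : Int)) ∧
  (∀ k : Int, st.2.2.2.1.getD k 0 = (st.2.2.2.2.countP (fun p => p.1 - p.2 == k) : Int))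

theorem pvRel_stepLamp (st : pvStA) (live : List (Int × Int)) (p : Int × Int)
    (h : pvRel st live) : pvRel (pvStepLamp st p) (live ++ [p]) := by
  obtain ⟨hnd, hmem, h1, h2, h3, h4⟩ := h
  unfold pvStepLamp
  by_cases hc : PySem.Set.contains st.2.2.2.2 p = true
  · simp only [hc, if_true]
    refine ⟨hnd, fun q => ?_, h1, h2, h3, h4⟩
    have hp : p ∈ st.2.2.2.2 := (PySem.Set.contains_iff _ _).1 hc
    simp only [List.mem_append, List.mem_singleton, hmem]
    constructor
    · exact fun hq => Or.inl hq
    · rintro (hq | rfl)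
      · exact hq
      · exact (hmem q).1 hp
  · have hc' : PySem.Set.contains st.2.2.2.2 p = false := by simpa using hc
    have hp : p ∉ st.2.2.2.2 := fun h => hc ((PySem.Set.contains_iff _ _).2 h)
    simp only [hc', Bool.false_eq_true, if_false]
    refine ⟨?_, fun q => ?_, fun k => ?_, fun k => ?_, fun k => ?_, fun k => ?_⟩
    · simp only [PySem.Set.add, hc', Bool.false_eq_true, if_false]
      exact List.Nodup.append hnd (List.nodup_singleton p) (by
        intro a ha hb; simp only [List.mem_singleton] at hb; subst hb; exact hp ha)
    · simp only [PySem.Set.add, hc', Bool.false_eq_true, if_false, List.mem_append,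
        List.mem_singleton, hmem]
    · simp only [PySem.Set.add, hc', Bool.false_eq_true, if_false, List.countP_append,
        PySem.Dict.getD_modify, h1]
      by_cases hk : k = p.1 <;> simp [hk, List.countP_cons] <;> omega
    · simp only [PySem.Set.add, hc', Bool.false_eq_true, if_false, List.countP_append,
        PySem.Dict.getD_modify, h2]
      by_cases hk : k = p.2 <;> simp [hk, List.countP_cons] <;> omega
    · simp only [PySem.Set.add, hc', Bool.false_eq_true, if_false, List.countP_append,
        PySem.Dict.getD_modify, h3]
      by_cases hk : k = p.1 + p.2 <;> simp [hk, List.countP_cons] <;> omega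
    · simp only [PySem.Set.add, hc', Bool.false_eq_true, if_false, List.countP_append,
        PySem.Dict.getD_modify, h4]
      by_cases hk : k = p.1 - p.2 <;> simp [hk, List.countP_cons] <;> omega

theorem pvRel_init (lamps : List (Int × Int)) :
    ∀ (st : pvStA) (live : List (Int × Int)), pvRel st live →
      pvRel (lamps.foldl pvStepLamp st) (live ++ lamps) := by
  induction lamps with
  | nil => intro st live h; simpa using h
  | cons p rest ih =>
      intro st live h
      have := ih (pvStepLamp st p) (live ++ [p]) (pvRel_stepLamp st live p h)
      simpa using this

-- removing one member from a duplicate-free set decrements exactly the matching counts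
theorem pvCountP_filter_ne {q : Int × Int} {S : List (Int × Int)} (hnd : S.Nodup) (hq : q ∈ S)
    (f : Int × Int → Bool) :
    (S.filter (fun y => !(y == q))).countP f = S.countP f - (if f q then 1 else 0) := by
  induction S with
  | nil => cases hq
  | cons a t ih =>
      by_cases hqa : a = q
      · subst hqa
        have hat : a ∉ t := (List.nodup_cons.1 hnd).1
        have hft : t.filter (fun y => !(y == a)) = t := by
          apply List.filter_eq_self.2
          intro b hb
          simp only [Bool.not_eq_eq_eq_not, Bool.not_true, beq_eq_false_iff_ne]
          rintro rfl; exact hat hb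
        simp [hft, List.countP_cons]
      · have hnd' : t.Nodup := (List.nodup_cons.1 hnd).2
        have hqt : q ∈ t := by
          rcases List.mem_cons.1 hq with h | h
          · exact absurd h.symm hqa
          · exact h
        have hfq1 : (if f q then 1 else 0) ≤ t.countP f := by
          split
          · exact List.countP_pos_iff.2 ⟨q, hqt, by assumption⟩
          · omega
        have haq : (a == q) = false := by simpa using hqa
        simp [haq, List.countP_cons, ih hnd' hqt]
        omega

theorem pvRel_stepDir (r c : Int) (st : pvStA) (live : List (Int × Int)) (d : Int × Int)
    (h : pvRel st live) :
    pvRel (pvStepDir r c st d) (live.filter (fun p => !(p == (r + d.1, c + d.2)))) := by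
  obtain ⟨hnd, hmem, h1, h2, h3, h4⟩ := h
  unfold pvStepDir
  set q : Int × Int := (r + d.1, c + d.2) with hqdef
  by_cases hc : PySem.Set.contains st.2.2.2.2 q
  · have hq : q ∈ st.2.2.2.2 := (PySem.Set.contains_iff _ _).1 hc
    simp only [hc, if_true]
    refine ⟨?_, fun p => ?_, fun k => ?_, fun k => ?_, fun k => ?_, fun k => ?_⟩
    · exact PySem.Set.nodup_discard _ _ hnd
    · rw [PySem.Set.mem_discard]
      simp only [List.mem_filter, hmem, Bool.not_eq_eq_eq_not, Bool.not_true, beq_eq_false_iff_ne]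
    · simp only [PySem.Dict.getD_modify, PySem.Set.discard,
        pvCountP_filter_ne hnd hq (fun p => p.1 == k), h1]
      by_cases hk : k = q.1
      · subst hk
        have hpos : 0 < st.2.2.2.2.countP (fun p => p.1 == q.1) :=
          List.countP_pos_iff.2 ⟨q, hq, by simp⟩
        simp; omega
      · have : ¬ (q.1 == k) = true := by simp [hk]; omega
        simp [hk, this]
    · simp only [PySem.Dict.getD_modify, PySem.Set.discard,
        pvCountP_filter_ne hnd hq (fun p => p.2 == k), h2]
      by_cases hk : k = q.2
      · subst hk
        have hpos : 0 < st.2.2.2.2.countP (fun p => p.2 == q.2) :=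
          List.countP_pos_iff.2 ⟨q, hq, by simp⟩
        simp; omega
      · have : ¬ (q.2 == k) = true := by simp [hk]; omega
        simp [hk, this]
    · simp only [PySem.Dict.getD_modify, PySem.Set.discard,
        pvCountP_filter_ne hnd hq (fun p => p.1 + p.2 == k), h3]
      by_cases hk : k = q.1 + q.2
      · subst hk
        have hpos : 0 < st.2.2.2.2.countP (fun p => p.1 + p.2 == q.1 + q.2) :=
          List.countP_pos_iff.2 ⟨q, hq, by simp⟩
        simp; omega
      · have : ¬ (q.1 + q.2 == k) = true := by simp [hk]; omega
        simp [hk, this]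
    · simp only [PySem.Dict.getD_modify, PySem.Set.discard,
        pvCountP_filter_ne hnd hq (fun p => p.1 - p.2 == k), h4]
      by_cases hk : k = q.1 - q.2
      · subst hk
        have hpos : 0 < st.2.2.2.2.countP (fun p => p.1 - p.2 == q.1 - q.2) :=
          List.countP_pos_iff.2 ⟨q, hq, by simp⟩
        simp; omega
      · have : ¬ (q.1 - q.2 == k) = true := by simp [hk]; omega
        simp [hk, this]
  · have hc' : PySem.Set.contains st.2.2.2.2 q = false := by simpa using hc
    have hq : q ∉ st.2.2.2.2 := fun h => hc ((PySem.Set.contains_iff _ _).2 h)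
    simp only [hc', Bool.false_eq_true, if_false]
    refine ⟨hnd, fun p => ?_, h1, h2, h3, h4⟩
    simp only [List.mem_filter, hmem, Bool.not_eq_eq_eq_not, Bool.not_true, beq_eq_false_iff_ne]
    constructor
    · intro hp
      refine ⟨hp, ?_⟩
      rintro rfl
      exact hq ((hmem _).2 hp)
    · exact fun hp => hp.1

theorem pvRel_foldDirs (r c : Int) (ds : List (Int × Int)) :
    ∀ (st : pvStA) (live : List (Int × Int)), pvRel st live →
      pvRel (ds.foldl (pvStepDir r c) st)
        (live.filter (fun p => ds.all (fun d => !(p == (r + d.1, c + d.2))))) := by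
  induction ds with
  | nil => intro st live h; simpa using h
  | cons d rest ih =>
      intro st live h
      have h1 := ih (pvStepDir r c st d) (live.filter (fun p => !(p == (r + d.1, c + d.2))))
        (pvRel_stepDir r c st live d h)
      simp only [List.foldl_cons]
      rw [List.filter_filter] at h1
      convert h1 using 2
      funext p
      simp [List.all_cons, Bool.and_comm]

-- the nine neighbour removals are exactly a Chebyshev-distance-≤-1 filter
theorem pvNine_eq_far (r c : Int) (p : Int × Int) :
    (pvDirs.all (fun d => !(p == (r + d.1, c + d.2)))) = pvFar (r, c) p := by
  obtain ⟨a, b⟩ := p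
  rw [Bool.eq_iff_iff]
  simp only [pvDirs, pvFar, List.all_cons, List.all_nil, Bool.and_true, Bool.and_eq_true,
    Bool.not_eq_true', beq_eq_false_iff_ne, ne_eq, Prod.mk.injEq, not_and,
    decide_eq_true_eq, lt_abs]
  omega

-- illumination read from the count maps = scan of the live list
theorem pvBit_eq (st : pvStA) (live : List (Int × Int)) (q : Int × Int) (h : pvRel st live) :
    (0 < st.1.getD q.1 0 ∨ 0 < st.2.1.getD q.2 0 ∨
     0 < st.2.2.1.getD (q.1 + q.2) 0 ∨ 0 < st.2.2.2.1.getD (q.1 - q.2) 0) ↔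
    live.any (pvLit q) = true := by
  obtain ⟨hnd, hmem, h1, h2, h3, h4⟩ := h
  rw [h1, h2, h3, h4]
  simp only [Int.natCast_pos, List.countP_pos_iff, List.any_eq_true, pvLit]
  constructor
  · rintro (⟨p, hp, he⟩ | ⟨p, hp, he⟩ | ⟨p, hp, he⟩ | ⟨p, hp, he⟩) <;>
      exact ⟨p, (hmem p).1 hp, by simp at he ⊢; omega⟩
  · rintro ⟨p, hp, he⟩
    simp only [Bool.or_eq_true, beq_iff_eq] at he
    rcases he with ((he | he) | he) | he
    · exact Or.inl ⟨p, (hmem p).2 hp, by simp [he]⟩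
    · exact Or.inr (Or.inl ⟨p, (hmem p).2 hp, by simp [he]⟩)
    · exact Or.inr (Or.inr (Or.inl ⟨p, (hmem p).2 hp, by simp [he]⟩))
    · exact Or.inr (Or.inr (Or.inr ⟨p, (hmem p).2 hp, by simp [he]⟩))

theorem pvMain (queries : List (Int × Int)) :
    ∀ (st : pvStA) (live : List (Int × Int)) (res : List Int), pvRel st live →
      (queries.foldl pvStepQuery (st, res)).2 = (queries.foldl pvStepQueryB (live, res)).2 := by
  induction queries with
  | nil => intro st live res _; rfl
  | cons q rest ih =>
      intro st live res h
      simp only [List.foldl_cons]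
      have hbit : (if 0 < st.1.getD q.1 0 ∨ 0 < st.2.1.getD q.2 0 ∨
          0 < st.2.2.1.getD (q.1 + q.2) 0 ∨ 0 < st.2.2.2.1.getD (q.1 - q.2) 0 then (1 : Int) else 0)
          = (if live.any (pvLit q) then (1 : Int) else 0) := by
        rcases pvBit_eq st live q h with ⟨hf, hg⟩
        by_cases hb : live.any (pvLit q) = true
        · simp [hb, hg hb]
        · have : ¬ (0 < st.1.getD q.1 0 ∨ 0 < st.2.1.getD q.2 0 ∨
            0 < st.2.2.1.getD (q.1 + q.2) 0 ∨ 0 < st.2.2.2.1.getD (q.1 - q.2) 0) :=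
            fun hx => hb (hf hx)
          simp [hb, this]
      have hrel : pvRel (pvDirs.foldl (pvStepDir q.1 q.2) st) (live.filter (pvFar q)) := by
        have h1 := pvRel_foldDirs q.1 q.2 pvDirs st live h
        have heq : live.filter (fun p => pvDirs.all (fun d => !(p == (q.1 + d.1, q.2 + d.2))))
            = live.filter (pvFar q) := by
          apply List.filter_congr
          intro p _
          exact pvNine_eq_far q.1 q.2 p
        rwa [heq] at h1
      have := ih (pvDirs.foldl (pvStepDir q.1 q.2) st) (live.filter (pvFar q))
        (res ++ [if live.any (pvLit q) then (1 : Int) else 0]) hrel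
      simpa [pvStepQuery, pvStepQueryB, hbit] using this

-- ===== VERDICT (by name: the statement is the Claim_ definition above) =====
theorem gridIllumination_spec : Claim_equal_gridIllumination := by
  intro n lamps queries _
  unfold Spec_gridIllumination gridIllumination gridIllumination_alt
  apply pvMain
  have h0 : pvRel (PySem.Dict.empty, PySem.Dict.empty, PySem.Dict.empty, PySem.Dict.empty,
      PySem.Set.empty) [] := by
    refine ⟨List.nodup_nil, by simp [PySem.Set.empty], ?_, ?_, ?_, ?_⟩ <;>
      intro k <;> simp [PySem.Set.empty, PySem.Dict.getD, PySem.Dict.get?, PySem.Dict.empty]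
  simpa using pvRel_init lamps _ [] h0
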